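-- pv_equiv track=rewrite | github.com/mguarin0/test-transfer | fout_preprocessing/src/strideFeatures.py | _separate_chain
-- ===== SOURCE A (Python) =====
-- def _separate_chain(flat_ress, idx_chain_letter):
--     """
--     desc:
--     args:
--     returns:
--     """
--     idx_splits = []
--     for i, res in enumerate(flat_ress):
--         chain_letter = res[idx_chain_letter]
--         if i==0:
--             prev_chain_letter = ""
--         if chain_letter != prev_chain_letter:
--             idx_splits.append(i)
--             prev_chain_letter = chain_letter
--     idx_splits.append(len(flat_ress))
--     return [flat_ress[idx_splits[i-1]:idx_splits[i]]
--                  for i in range(len(idx_splits)) if i!=0]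
-- ===== SOURCE B (Python) =====
-- def _separate_chain(flat_ress, idx_chain_letter):
--     """Single-pass group builder: start a new group whenever the chain letter changes."""
--     groups = []
--     prev = None
--     for res in flat_ress:
--         cl = res[idx_chain_letter]
--         if cl != prev:
--             groups.append([res])
--             prev = cl
--         else:
--             groups[-1].append(res)
--     return groups
-- ===== Notes on version B (the rewrite author's own statement) =====
-- stated objective: simpler
-- what changed: Replaced A's two-phase algorithm (first collect split indices with an empty-string sentinel, then slice the list between consecutive indices) by a single-pass group builder that starts a new group whenever the chain letter changes, using None as the no-previous marker.
-- intended difference: On nonempty inputs whose first residue has the empty string as its chain-letter field, A's sentinel prev='' collides with the data and A silently drops the whole leading run of empty-letter residues, while B returns that run as a group like any other, which is the intended grouping. — e.g. on _separate_chain([[""], ["A"]], 0): A returns [[["A"]]], B returns [[[""]], [["A"]]]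
import Mathlib
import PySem

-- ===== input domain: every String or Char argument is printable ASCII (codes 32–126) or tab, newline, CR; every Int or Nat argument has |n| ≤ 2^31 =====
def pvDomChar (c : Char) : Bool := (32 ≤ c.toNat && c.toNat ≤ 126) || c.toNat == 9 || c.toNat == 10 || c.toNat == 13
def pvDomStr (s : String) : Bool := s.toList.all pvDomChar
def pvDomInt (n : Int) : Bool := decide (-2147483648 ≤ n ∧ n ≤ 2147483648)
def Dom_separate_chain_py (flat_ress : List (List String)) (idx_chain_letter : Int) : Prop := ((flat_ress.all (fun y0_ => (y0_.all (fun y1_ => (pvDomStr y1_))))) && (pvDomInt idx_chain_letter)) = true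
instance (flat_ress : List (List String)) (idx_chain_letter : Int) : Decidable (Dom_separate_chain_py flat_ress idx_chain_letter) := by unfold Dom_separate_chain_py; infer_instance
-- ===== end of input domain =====

-- B replaces A's two-phase split-index-then-slice algorithm by a single-pass group builder
-- (simpler); outside Pre_ (some residue's chain-letter index out of range) A raises IndexError.


-- shared indexing helper: res[idx] as both Pythons compute it (total form; exact under Pre_)
def pvLtr (idx : Int) (r : List String) : String := (PySem.List.pyGet? r idx).getD ""

-- ===== PORT A =====
-- loop body of A's first phase (state: idx_splits so far, prev_chain_letter)
def pvStepA (idx : Int) (st : List Int × String) (p : Int × List String) : List Int × String :=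
  let chain_letter := pvLtr idx p.2
  let prev := if p.1 = 0 then "" else st.2
  if chain_letter ≠ prev then (st.1 ++ [p.1], chain_letter) else (st.1, prev)

def separate_chain_py (flat_ress : List (List String)) (idx_chain_letter : Int) : List (List (List String)) :=
  let st := (PySem.List.enumerate flat_ress 0).foldl (pvStepA idx_chain_letter) ([], "")
  let idx_splits := st.1 ++ [(flat_ress.length : Int)]
  (List.range idx_splits.length).filterMap
    (fun i => if i ≠ 0 then
        some (PySem.List.slice flat_ress (some (idx_splits.getD (i - 1) 0)) (some (idx_splits.getD i 0)))
      else none)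

-- ===== PORT B =====
-- loop body of B (state: groups so far, prev as Option: None before the first residue)
def pvStepB (idx : Int) (st : List (List (List String)) × Option String) (res : List String) :
    List (List (List String)) × Option String :=
  let cl := pvLtr idx res
  if some cl ≠ st.2 then (st.1 ++ [[res]], some cl)
  else (st.1.dropLast ++ [st.1.getLastD [] ++ [res]], st.2)

def separate_chain_py_alt (flat_ress : List (List String)) (idx_chain_letter : Int) : List (List (List String)) :=
  (flat_ress.foldl (pvStepB idx_chain_letter) ([], none)).1

-- ===== PRECONDITION & SPEC =====
-- Pre_ excludes exactly the inputs where A raises IndexError: some residue's chain-letter index out of range.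
def Pre_separate_chain_py (flat_ress : List (List String)) (idx_chain_letter : Int) : Prop :=
  ∀ res ∈ flat_ress, PySem.Raise.InRange res.length idx_chain_letter
instance (flat_ress : List (List String)) (idx_chain_letter : Int) : Decidable (Pre_separate_chain_py flat_ress idx_chain_letter) := by unfold Pre_separate_chain_py; infer_instance
def pvWitness_separate_chain_py : List (List String) × Int := ([["A"], ["A"], ["B"]], 0)

-- On nonempty inputs whose first residue's chain-letter field is the empty string, A's sentinel
-- prev="" collides with the data and A silently drops the whole leading run of empty-letter
-- residues, while B returns that run as a group like any other, which is the intended grouping.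
def D_separate_chain_py (flat_ress : List (List String)) (idx_chain_letter : Int) : Prop :=
  flat_ress ≠ [] ∧ PySem.List.pyGet? (flat_ress.headD []) idx_chain_letter = some ""
instance (flat_ress : List (List String)) (idx_chain_letter : Int) : Decidable (D_separate_chain_py flat_ress idx_chain_letter) := by unfold D_separate_chain_py; infer_instance

def Spec_separate_chain_py (flat_ress : List (List String)) (idx_chain_letter : Int) (out : List (List (List String))) : Prop := ¬ D_separate_chain_py flat_ress idx_chain_letter → out = separate_chain_py_alt flat_ress idx_chain_letter
instance (flat_ress : List (List String)) (idx_chain_letter : Int) (out : List (List (List String))) : Decidable (Spec_separate_chain_py flat_ress idx_chain_letter out) := by unfold Spec_separate_chain_py; infer_instance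

def pvDiffWitness_separate_chain_py : List (List String) × Int := ([[""], ["A"]], 0)
def pvDiffWitnessOut_separate_chain_py : (List (List (List String))) × (List (List (List String))) :=
  ([[["A"]]], [[[""]], [["A"]]])

-- ===== CLAIM (what is proved, stated in full; the proofs are below) =====
def Claim_unchanged_separate_chain_py : Prop := ∀ (flat_ress : List (List String)) (idx_chain_letter : Int), Dom_separate_chain_py flat_ress idx_chain_letter → Pre_separate_chain_py flat_ress idx_chain_letter → Spec_separate_chain_py flat_ress idx_chain_letter (separate_chain_py flat_ress idx_chain_letter)
def Claim_changed_separate_chain_py : Prop := Dom_separate_chain_py (pvDiffWitness_separate_chain_py.1) (pvDiffWitness_separate_chain_py.2) ∧ Pre_separate_chain_py (pvDiffWitness_separate_chain_py.1) (pvDiffWitness_separate_chain_py.2) ∧ D_separate_chain_py (pvDiffWitness_separate_chain_py.1) (pvDiffWitness_separate_chain_py.2) ∧ separate_chain_py (pvDiffWitness_separate_chain_py.1) (pvDiffWitness_separate_chain_py.2) = pvDiffWitnessOut_separate_chain_py.1 ∧ separate_chain_py_alt (pvDiffWitness_separate_chain_py.1) (pvDiffWitness_separate_chain_py.2) = pvDiffWitnessOut_separate_chain_py.2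 ∧ pvDiffWitnessOut_separate_chain_py.1 ≠ pvDiffWitnessOut_separate_chain_py.2
def Claim_exact_separate_chain_py : Prop := ∀ (flat_ress : List (List String)) (idx_chain_letter : Int), Dom_separate_chain_py flat_ress idx_chain_letter → Pre_separate_chain_py flat_ress idx_chain_letter → D_separate_chain_py flat_ress idx_chain_letter → separate_chain_py flat_ress idx_chain_letter ≠ separate_chain_py_alt flat_ress idx_chain_letter

-- ===== LEMMAS AND PROOFS =====

-- canonical grouping: glue the current group g (letter cl) with the rest of the list
def pvGlue (idx : Int) (g : List (List String)) (cl : String) : List (List String) → List (List (List String))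
  | [] => [g]
  | r :: rs => if pvLtr idx r ≠ cl then g :: pvGlue idx [r] (pvLtr idx r) rs else pvGlue idx (g ++ [r]) cl rs

-- split indices produced by A's first phase when starting at position i with prev = cl
def pvRuns (idx : Int) (i : Nat) (cl : String) : List (List String) → List Int
  | [] => []
  | r :: rs => if pvLtr idx r ≠ cl then (i : Int) :: pvRuns idx (i + 1) (pvLtr idx r) rs
               else pvRuns idx (i + 1) cl rs

def pvLastCl (idx : Int) (cl : String) : List (List String) → String
  | [] => cl
  | r :: rs => pvLastCl idx (pvLtr idx r) rs

-- consecutive-pairs map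
def pvPm {β : Type} (f : Int → Int → β) : List Int → List β
  | a :: b :: t => f a b :: pvPm f (b :: t)
  | _ => []

theorem pvGlue_ne_nil (idx : Int) : ∀ (l : List (List String)) (g : List (List String)) (cl : String),
    pvGlue idx g cl l ≠ [] := by
  intro l
  induction l with
  | nil => intro g cl; simp [pvGlue]
  | cons r rs ih =>
      intro g cl
      simp only [pvGlue]
      split
      · simp
      · exact ih _ _

theorem pvFoldA_eq (idx : Int) : ∀ (l : List (List String)) (i : Nat) (s : List Int) (cl : String),
    1 ≤ i →
    (PySem.List.enumerate l (i : Int)).foldl (pvStepA idx) (s, cl)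
      = (s ++ pvRuns idx i cl l, pvLastCl idx cl l) := by
  intro l
  induction l with
  | nil => intro i s cl _; simp [PySem.List.enumerate_nil, pvRuns, pvLastCl]
  | cons r rs ih =>
      intro i s cl hi
      rw [PySem.List.enumerate_cons]
      have h0 : ¬ ((i : Int) = 0) := by omega
      simp only [List.foldl_cons, pvStepA, if_neg h0, pvRuns, pvLastCl]
      rw [show ((i : Int) + 1) = ((i + 1 : Nat) : Int) by push_cast; ring]
      by_cases hc : pvLtr idx r ≠ cl
      · rw [if_pos hc, if_pos hc, ih (i + 1) (s ++ [(i : Int)]) (pvLtr idx r) (by omega)]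
        simp
      · rw [if_neg hc, if_neg hc]
        have hceq : pvLtr idx r = cl := not_ne_iff.mp hc
        rw [hceq, ih (i + 1) s cl (by omega)]

theorem pvFoldB_eq (idx : Int) : ∀ (l : List (List String)) (gs : List (List (List String)))
    (g : List (List String)) (cl : String),
    l.foldl (pvStepB idx) (gs ++ [g], some cl)
      = (gs ++ pvGlue idx g cl l, some (pvLastCl idx cl l)) := by
  intro l
  induction l with
  | nil => intro gs g cl; simp [pvGlue, pvLastCl]
  | cons r rs ih =>
      intro gs g cl
      simp only [List.foldl_cons, pvStepB, pvGlue, pvLastCl]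
      by_cases hc : pvLtr idx r ≠ cl
      · have hs : (some (pvLtr idx r) ≠ some cl) := by simpa using hc
        rw [if_pos hs, if_pos hc]
        rw [show gs ++ [g] ++ [[r]] = (gs ++ [g]) ++ [[r]] by simp]
        rw [ih (gs ++ [g]) [r] (pvLtr idx r)]
        simp
      · have hceq : pvLtr idx r = cl := not_ne_iff.mp hc
        have hs : ¬ (some (pvLtr idx r) ≠ some cl) := by simp [hceq]
        rw [if_neg hs, if_neg hc, List.dropLast_concat, List.getLastD_concat, hceq,
          ih gs (g ++ [r]) cl]

theorem pvAlt_eq (flat : List (List String)) (idx : Int) :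
    separate_chain_py_alt flat idx
      = match flat with
        | [] => []
        | r :: rest => pvGlue idx [r] (pvLtr idx r) rest := by
  cases flat with
  | nil => rfl
  | cons r rest =>
      simp only [separate_chain_py_alt, List.foldl_cons, pvStepB]
      have hsn : (some (pvLtr idx r) ≠ (none : Option String)) := by simp
      rw [if_pos hsn]
      have := pvFoldB_eq idx rest [] [r] (pvLtr idx r)
      simpa using congrArg Prod.fst this

-- the range/filterMap comprehension over consecutive entries is the pairs map
theorem pvPairs_aux {β : Type} (f : Int → Int → β) : ∀ (t : List Int) (a : Int),
    (List.range t.length).map (fun j => f ((a :: t).getD j 0) (t.getD j 0)) = pvPm f (a :: t) := by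
  intro t
  induction t with
  | nil => intro a; simp [pvPm]
  | cons b t' ih =>
      intro a
      rw [show (b :: t').length = t'.length + 1 from rfl, List.range_succ_eq_map]
      simp only [List.map_cons, List.map_map]
      rw [show pvPm f (a :: b :: t') = f a b :: pvPm f (b :: t') from rfl]
      congr 1
      have := ih b
      rw [← this]
      apply List.map_congr_left
      intro j _
      simp

theorem pvPairs {β : Type} (f : Int → Int → β) (a : Int) (t : List Int) :
    (List.range (a :: t).length).filterMap
        (fun i => if i ≠ 0 then some (f ((a :: t).getD (i - 1) 0) ((a :: t).getD i 0)) else none)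
      = pvPm f (a :: t) := by
  rw [show (a :: t).length = t.length + 1 from rfl, List.range_succ_eq_map]
  simp only [List.filterMap_cons, ne_eq, not_true_eq_false, List.filterMap_map]
  rw [← pvPairs_aux f t a]
  rw [List.filterMap_eq_map_iff_forall_eq_some.mpr ?_ ]
  · rfl
  · intro j _
    simp [Function.comp]

-- key: slicing flat at consecutive split indices yields the canonical grouping
theorem pvKey (idx : Int) (flat : List (List String)) :
    ∀ (l : List (List String)) (i s : Nat) (cl : String),
    s ≤ i → i ≤ flat.length → flat.drop i = l →
    pvPm (fun a b => PySem.List.slice flat (some a) (some b))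
        (((s : Nat) : Int) :: (pvRuns idx i cl l ++ [(flat.length : Int)]))
      = pvGlue idx ((flat.drop s).take (i - s)) cl l := by
  intro l
  induction l with
  | nil =>
      intro i s cl hsi hil hdrop
      have hieq : i = flat.length := by
        have := List.drop_eq_nil_iff.mp hdrop; omega
      subst hieq
      simp only [pvRuns, List.nil_append, pvGlue]
      rw [show pvPm (fun a b => PySem.List.slice flat (some a) (some b))
            [((s : Nat) : Int), (flat.length : Int)]
          = [PySem.List.slice flat (some ((s : Nat) : Int)) (some ((flat.length : Nat) : Int))] from rfl]
      rw [PySem.List.slice_natCast]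
  | cons r rs ih =>
      intro i s cl hsi hil hdrop
      have hlt : i < flat.length := by
        by_contra h
        have : flat.drop i = [] := List.drop_eq_nil_iff.mpr (by omega)
        rw [this] at hdrop; exact (List.cons_ne_nil r rs) hdrop.symm
      have hdrop1 : flat.drop (i + 1) = rs := by
        have h1 : flat.drop (i + 1) = (flat.drop i).drop 1 := by rw [List.drop_drop]
        rw [h1, hdrop]; rfl
      have h0 : flat[i]? = some r := by
        have h2 := congrArg (fun l => l[0]?) hdrop
        simpa [List.getElem?_drop] using h2
      have hget : flat[i]'hlt = r := by
        rw [List.getElem?_eq_getElem hlt] at h0; exact Option.some.inj h0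
      simp only [pvRuns, pvGlue]
      by_cases hc : pvLtr idx r ≠ cl
      · rw [if_pos hc, if_pos hc, List.cons_append]
        rw [show pvPm (fun a b => PySem.List.slice flat (some a) (some b))
              (((s : Nat) : Int) :: ((i : Nat) : Int) :: (pvRuns idx (i + 1) (pvLtr idx r) rs ++ [(flat.length : Int)]))
            = PySem.List.slice flat (some ((s : Nat) : Int)) (some ((i : Nat) : Int))
              :: pvPm (fun a b => PySem.List.slice flat (some a) (some b))
                  (((i : Nat) : Int) :: (pvRuns idx (i + 1) (pvLtr idx r) rs ++ [(flat.length : Int)])) from rfl]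
        rw [ih (i + 1) i (pvLtr idx r) (by omega) (by omega) hdrop1]
        rw [PySem.List.slice_natCast]
        congr 2
        · rw [show i + 1 - i = 1 by omega, hdrop]
          rfl
      · rw [if_neg hc, if_neg hc]
        have hceq : pvLtr idx r = cl := not_ne_iff.mp hc
        rw [ih (i + 1) s cl (by omega) (by omega) hdrop1]
        congr 1
        rw [show i + 1 - s = (i - s) + 1 by omega, List.take_add_one]
        have hg : (flat.drop s)[i - s]? = some r := by
          rw [List.getElem?_drop, show s + (i - s) = i by omega, h0]
        simp [hg]

theorem pvA_eq (flat : List (List String)) (idx : Int) :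
    separate_chain_py flat idx
      = match flat with
        | [] => []
        | r :: rest =>
            if pvLtr idx r ≠ "" then pvGlue idx [r] (pvLtr idx r) rest
            else (pvGlue idx [r] "" rest).tail := by
  cases flat with
  | nil => rfl
  | cons r rest =>
      simp only [separate_chain_py]
      rw [PySem.List.enumerate_cons]
      simp only [List.foldl_cons, pvStepA, if_true]
      by_cases hc : pvLtr idx r ≠ ""
      · rw [if_pos hc, if_pos hc]
        rw [show ((0 : Int) + 1) = ((1 : Nat) : Int) by norm_num]
        simp only [List.nil_append]
        rw [pvFoldA_eq idx rest 1 [(0 : Int)] (pvLtr idx r) le_rfl]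
        have hkey := pvKey idx (r :: rest) rest 1 0 (pvLtr idx r) (by omega) (by simp) (by rfl)
        rw [show ((0 : Nat) : Int) = (0 : Int) by norm_num] at hkey
        simp only [List.cons_append, List.nil_append]
        rw [pvPairs (fun a b => PySem.List.slice (r :: rest) (some a) (some b)) 0
              (pvRuns idx 1 (pvLtr idx r) rest ++ [((r :: rest).length : Int)])]
        rw [hkey]
        simp
      · rw [if_neg hc, if_neg hc]
        rw [show ((0 : Int) + 1) = ((1 : Nat) : Int) by norm_num]
        rw [pvFoldA_eq idx rest 1 [] "" le_rfl]
        simp only [List.nil_append]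
        -- the splits list is pvRuns ++ [len]; expose its head
        obtain ⟨a, t, hat⟩ : ∃ a t, pvRuns idx 1 "" rest ++ [((r :: rest).length : Int)] = a :: t := by
          cases h : pvRuns idx 1 "" rest ++ [((r :: rest).length : Int)] with
          | nil => exact absurd h (by simp)
          | cons a t => exact ⟨a, t, rfl⟩
        rw [hat]
        rw [pvPairs (fun a b => PySem.List.slice (r :: rest) (some a) (some b)) a t]
        have hkey := pvKey idx (r :: rest) rest 1 0 "" (by omega) (by simp) (by rfl)
        rw [show ((0 : Nat) : Int) = (0 : Int) by norm_num, hat] at hkey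
        have htail := congrArg List.tail hkey
        rw [show pvPm (fun a b => PySem.List.slice (r :: rest) (some a) (some b)) ((0 : Int) :: a :: t)
            = PySem.List.slice (r :: rest) (some 0) (some a)
              :: pvPm (fun a b => PySem.List.slice (r :: rest) (some a) (some b)) (a :: t) from rfl] at htail
        simp only [List.tail_cons] at htail
        rw [htail]
        congr 1

-- ===== VERDICT (by name: the statement is the Claim_ definition above) =====
theorem separate_chain_py_spec : Claim_unchanged_separate_chain_py := by
  intro flat idx _ hpre hnd
  cases flat with
  | nil => rfl
  | cons r rest =>
      have hin : PySem.Raise.InRange r.length idx := hpre r (by simp)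
      obtain ⟨c, hc⟩ : ∃ c, PySem.List.pyGet? r idx = some c := by
        cases h : PySem.List.pyGet? r idx with
        | none => exact absurd (Iff.mp (PySem.List.pyGet?_eq_none_iff r idx) h) (not_not_intro hin)
        | some c => exact ⟨c, rfl⟩
      have hcne : c ≠ "" := by
        intro h
        exact hnd ⟨by simp, by simpa [h] using hc⟩
      have hltr : pvLtr idx r = c := by simp [pvLtr, hc]
      rw [pvA_eq, pvAlt_eq]
      simp [hltr, hcne]

theorem separate_chain_py_changed : Claim_changed_separate_chain_py := by
  unfold Claim_changed_separate_chain_py; decide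

theorem separate_chain_py_tight : Claim_exact_separate_chain_py := by
  intro flat idx _ _ hd
  obtain ⟨hne, hget⟩ := hd
  cases flat with
  | nil => exact absurd rfl hne
  | cons r rest =>
      have hltr : pvLtr idx r = "" := by
        simp only [List.headD_cons] at hget
        simp [pvLtr, hget]
      rw [pvA_eq, pvAlt_eq]
      simp only [hltr, ne_eq, not_true_eq_false, if_false]
      intro h
      have hglue := pvGlue_ne_nil idx rest [r] ""
      have hlen := congrArg List.length h
      cases hg : pvGlue idx [r] "" rest with
      | nil => exact hglue hg
      | cons x xs =>
          rw [hg] at hlen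
          simp at hlen
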